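-- pv_equiv track=rewrite | github.com/GundamWingGit/accesslecture | backend/app/services/caption_formatter.py | to_txt
-- ===== SOURCE A (Python) =====
-- def to_txt(captions: list[dict], use_cleaned: bool = True) -> str:
--     lines = []
--     current_speaker = None
--     for cap in captions:
--         text = (cap.get("cleaned_text") or cap["original_text"]) if use_cleaned else cap["original_text"]
--         speaker = cap.get("speaker")
--         if speaker and speaker != current_speaker:
--             if lines:
--                 lines.append("")
--             lines.append(f"[{speaker}]")
--             current_speaker = speaker
--         lines.append(text)
--     return "\n".join(lines)
-- ===== SOURCE B (Python) =====
-- def _piece(t, s, p, first):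
--     # one output fragment per caption: its separator + optional header + text
--     if s and s != p:
--         return ("" if first else "\n\n") + "[%s]\n%s" % (s, t)
--     return ("" if first else "\n") + t
--
--
-- def to_txt(captions: list[dict], use_cleaned: bool = True) -> str:
--     # Staged passes: extract texts and speakers, forward-fill the previous truthy
--     # speaker per caption, render one self-contained fragment per caption, concat.
--     texts = [(cap.get("cleaned_text") or cap["original_text"]) if use_cleaned else cap["original_text"]
--              for cap in captions]
--     speakers = [cap.get("speaker") or "" for cap in captions]
--     prev = []
--     last = ""
--     for s in speakers:
--         prev.append(last)
--         if s:
--             last = s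
--     rows = list(zip(texts, speakers, prev))
--     if not rows:
--         return ""
--     pieces = [_piece(*rows[0], True)] + [_piece(t, s, p, False) for t, s, p in rows[1:]]
--     return "".join(pieces)
-- ===== Notes on version B (the rewrite author's own statement) =====
-- stated objective: alternative
-- what changed: B replaces A's stateful flat lines list with staged passes: extract texts and speakers, forward-fill the previous truthy speaker per caption, then render one self-contained fragment (separator + optional header + text) per caption and concatenate them.
import Mathlib
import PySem

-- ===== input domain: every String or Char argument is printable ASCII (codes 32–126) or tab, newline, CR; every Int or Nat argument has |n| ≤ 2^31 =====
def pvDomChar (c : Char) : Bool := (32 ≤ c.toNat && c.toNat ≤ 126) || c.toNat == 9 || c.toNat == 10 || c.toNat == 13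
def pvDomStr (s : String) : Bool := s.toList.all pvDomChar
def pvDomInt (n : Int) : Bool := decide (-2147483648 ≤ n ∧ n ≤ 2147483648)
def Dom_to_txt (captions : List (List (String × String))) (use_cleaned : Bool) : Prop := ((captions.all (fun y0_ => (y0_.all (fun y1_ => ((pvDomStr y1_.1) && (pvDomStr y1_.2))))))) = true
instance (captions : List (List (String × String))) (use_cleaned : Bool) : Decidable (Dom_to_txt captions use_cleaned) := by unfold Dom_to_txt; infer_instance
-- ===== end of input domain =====

-- B replaces A's stateful flat lines list by staged passes (texts, speakers, a
-- forward-filled previous-speaker list, one rendered fragment per caption, concatenated);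
-- objective: alternative decomposition, same cost.


-- shared helper: text = (cap.get("cleaned_text") or cap["original_text"]) if use_cleaned else cap["original_text"]
-- (the KeyError case — key missing and needed — is excluded by Pre_; getD "" is the total stand-in there)
def capText (cap : List (String × String)) (use_cleaned : Bool) : String :=
  if use_cleaned then
    let c := (cap.lookup "cleaned_text").getD ""
    if c ≠ "" then c else (cap.lookup "original_text").getD ""
  else (cap.lookup "original_text").getD ""

-- shared helper: cap.get("speaker"); None and "" are both falsy, so both are modelled as ""
def capSpeaker (cap : List (String × String)) : String :=
  (cap.lookup "speaker").getD ""

-- ===== PORT A =====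
def to_txt (captions : List (List (String × String))) (use_cleaned : Bool) : String :=
  let st := captions.foldl (fun (st : List String × String) cap =>
      let text := capText cap use_cleaned
      let speaker := capSpeaker cap
      if speaker ≠ "" ∧ speaker ≠ st.2 then
        ((if st.1 = [] then st.1 else st.1 ++ [""]) ++ ["[" ++ speaker ++ "]", text], speaker)
      else
        (st.1 ++ [text], st.2))
    ([], "")
  PySem.Str.join "\n" st.1

-- ===== PORT B =====
-- one output fragment per caption: its separator + optional header + text
def piece (t s p : String) (first : Bool) : String :=
  if s ≠ "" ∧ s ≠ p then
    (if first then "" else "\n\n") ++ "[" ++ s ++ "]" ++ "\n" ++ t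
  else
    (if first then "" else "\n") ++ t

-- forward-fill: prev[i] = last truthy speaker strictly before index i
def prevFill (last : String) : List String → List String
  | [] => []
  | s :: rest => last :: prevFill (if s ≠ "" then s else last) rest

def to_txt_alt (captions : List (List (String × String))) (use_cleaned : Bool) : String :=
  let texts := captions.map (fun cap => capText cap use_cleaned)
  let speakers := captions.map capSpeaker
  let prev := prevFill "" speakers
  let rows := texts.zip (speakers.zip prev)
  let pieces := match rows with
    | [] => []
    | r :: rs => piece r.1 r.2.1 r.2.2 true :: rs.map (fun r => piece r.1 r.2.1 r.2.2 false)
  PySem.Str.join "" pieces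

-- ===== PRECONDITION & SPEC =====
-- Pre_ excludes exactly the inputs on which A raises KeyError: some caption needs
-- "original_text" (use_cleaned is false, or its cleaned_text is missing/empty) but lacks it.
def Pre_to_txt (captions : List (List (String × String))) (use_cleaned : Bool) : Prop :=
  ∀ cap ∈ captions,
    (use_cleaned = true ∧ (cap.lookup "cleaned_text").getD "" ≠ "") ∨ (cap.lookup "original_text").isSome = true
instance (captions : List (List (String × String))) (use_cleaned : Bool) : Decidable (Pre_to_txt captions use_cleaned) := by unfold Pre_to_txt; infer_instance

def pvWitness_to_txt : (List (List (String × String))) × Bool :=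
  ([[("speaker", "Ann"), ("original_text", "hi")], [("original_text", "more")]], true)

def Spec_to_txt (captions : List (List (String × String))) (use_cleaned : Bool) (out : String) : Prop := out = to_txt_alt captions use_cleaned
instance (captions : List (List (String × String))) (use_cleaned : Bool) (out : String) : Decidable (Spec_to_txt captions use_cleaned out) := by unfold Spec_to_txt; infer_instance

-- ===== CLAIM (what is proved, stated in full; the proofs are below) =====
def Claim_equal_to_txt : Prop := ∀ (captions : List (List (String × String))) (use_cleaned : Bool), Dom_to_txt captions use_cleaned → Pre_to_txt captions use_cleaned → Spec_to_txt captions use_cleaned (to_txt captions use_cleaned)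

-- ===== LEMMAS AND PROOFS =====

-- proof-side common form: the character stream both programs emit from state (cs, first)
def restC (use_cleaned : Bool) (cs : String) (first : Bool) : List (List (String × String)) → List Char
  | [] => []
  | cap :: rest =>
    let t := capText cap use_cleaned
    let s := capSpeaker cap
    (if s ≠ "" ∧ s ≠ cs then
        (if first then [] else ['\n', '\n']) ++ ('[' :: s.toList ++ [']', '\n']) ++ t.toList
      else
        (if first then [] else ['\n']) ++ t.toList) ++
    restC use_cleaned (if s ≠ "" then s else cs) false rest

lemma icc (sep x y : List Char) (ys : List (List Char)) :
    List.intercalate sep (x :: y :: ys) = x ++ sep ++ List.intercalate sep (y :: ys) := by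
  simp [List.intercalate]

lemma ione (sep x : List Char) : List.intercalate sep [x] = x := by
  simp [List.intercalate]

lemma inil (sep : List Char) : List.intercalate sep ([] : List (List Char)) = [] := by
  simp [List.intercalate]

lemma iflat (xss : List (List Char)) : List.intercalate ([] : List Char) xss = xss.flatten := by
  induction xss with
  | nil => simp [List.intercalate]
  | cons x xs ih =>
    cases xs with
    | nil => simp [ione]
    | cons y ys => rw [icc, List.flatten_cons, ← ih]; simp

lemma intercalate_append_left (sep : List Char) (a : List (List Char)) (b : List Char)
    (bs : List (List Char)) (ha : a ≠ []) :
    List.intercalate sep (a ++ b :: bs) = List.intercalate sep a ++ sep ++ List.intercalate sep (b :: bs) := by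
  induction a with
  | nil => exact absurd rfl ha
  | cons x xs ih =>
    cases xs with
    | nil => simp [icc, ione]
    | cons y ys =>
      have ih' := ih (by simp)
      simp only [List.cons_append] at ih' ⊢
      rw [icc sep x y (ys ++ b :: bs), ih', icc sep x y ys]
      simp [List.append_assoc]

-- A's loop invariant: the joined flat lines list equals the joined prefix plus the common stream
lemma A_inv (uc : Bool) (caps : List (List (String × String))) :
    ∀ (lines : List String) (cs : String),
    List.intercalate ['\n'] (((caps.foldl (fun (st : List String × String) cap =>
        let text := capText cap uc
        let speaker := capSpeaker cap
        if speaker ≠ "" ∧ speaker ≠ st.2 then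
          ((if st.1 = [] then st.1 else st.1 ++ [""]) ++ ["[" ++ speaker ++ "]", text], speaker)
        else
          (st.1 ++ [text], st.2)) (lines, cs)).1).map String.toList)
      = List.intercalate ['\n'] (lines.map String.toList) ++ restC uc cs lines.isEmpty caps := by
  induction caps with
  | nil => intro lines cs; simp [restC]
  | cons cap rest ih =>
    intro lines cs
    simp only [List.foldl_cons]
    by_cases hsp : capSpeaker cap ≠ "" ∧ capSpeaker cap ≠ cs
    · simp only [if_pos hsp]
      rw [ih]
      have hsnext : (if capSpeaker cap ≠ "" then capSpeaker cap else cs) = capSpeaker cap := by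
        rw [if_pos hsp.1]
      cases lines with
      | nil =>
        simp only [restC, if_pos hsp, hsnext, List.isEmpty_nil, ite_true]
        simp [icc, ione, inil, String.toList_append]
      | cons l ls =>
        have h1 : ((l :: ls) ++ [""] : List String) ≠ [] := by simp
        simp only [restC, if_pos hsp, hsnext]
        simp only [List.isEmpty_cons, if_neg (by simp : ¬ ((l :: ls : List String) = []))]
        rw [show ((l :: ls) ++ [""] ++ ["[" ++ capSpeaker cap ++ "]", capText cap uc] : List String)
              = (l :: ls) ++ ["", "[" ++ capSpeaker cap ++ "]", capText cap uc] by simp,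
            List.map_append]
        simp only [List.map_cons, List.map_nil]
        rw [intercalate_append_left ['\n'] (l.toList :: List.map String.toList ls) _ _ (by simp)]
        simp [icc, ione, String.toList_append, List.append_assoc]
    · simp only [if_neg hsp]
      rw [ih]
      have hsnext : (if capSpeaker cap ≠ "" then capSpeaker cap else cs) = cs := by
        by_cases h : capSpeaker cap = ""
        · rw [if_neg (by simp [h])]
        · have : capSpeaker cap = cs := by
            by_contra hc; exact hsp ⟨h, hc⟩
          rw [if_pos h, this]
      cases lines with
      | nil =>
        simp only [restC, if_neg hsp, hsnext, List.isEmpty_nil]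
        simp [ione, inil]
      | cons l ls =>
        simp only [restC, if_neg hsp, hsnext, List.isEmpty_cons]
        rw [List.map_append]
        simp only [List.map_cons, List.map_nil]
        rw [intercalate_append_left ['\n'] (l.toList :: List.map String.toList ls) _ _ (by simp)]
        simp [ione, List.append_assoc]

-- the rendered fragment, at character level
lemma piece_toList (t s p : String) (first : Bool) :
    (piece t s p first).toList =
      (if s ≠ "" ∧ s ≠ p then
          (if first then [] else ['\n', '\n']) ++ ('[' :: s.toList ++ [']', '\n']) ++ t.toList
        else
          (if first then [] else ['\n']) ++ t.toList) := by
  unfold piece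
  split_ifs with h1 h2 h2 <;> simp [String.toList_append]

-- B's staged pipeline emits the same common stream
lemma B_inv (uc : Bool) (caps : List (List (String × String))) :
    ∀ (last : String) (first : Bool),
    ((match (caps.map (fun cap => capText cap uc)).zip
        ((caps.map capSpeaker).zip (prevFill last (caps.map capSpeaker))) with
      | [] => []
      | r :: rs => piece r.1 r.2.1 r.2.2 first :: rs.map (fun r' : String × String × String => piece r'.1 r'.2.1 r'.2.2 false)).map
        String.toList).flatten = restC uc last first caps := by
  induction caps with
  | nil => intro last first; simp [restC]
  | cons cap rest ih =>
    intro last first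
    simp only [List.map_cons, prevFill, List.zip_cons_cons]
    cases hres : (rest.map (fun cap => capText cap uc)).zip
        ((rest.map capSpeaker).zip (prevFill (if capSpeaker cap ≠ "" then capSpeaker cap else last)
          (rest.map capSpeaker))) with
    | nil =>
      have ih' := ih (if capSpeaker cap ≠ "" then capSpeaker cap else last) false
      rw [hres] at ih'
      simp only [] at ih' ⊢
      simp only [restC, ← ih']
      simp [piece_toList]
    | cons r rs =>
      have ih' := ih (if capSpeaker cap ≠ "" then capSpeaker cap else last) false
      rw [hres] at ih'
      simp only [] at ih' ⊢
      simp only [restC, ← ih']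
      simp [piece_toList]

-- ===== VERDICT (by name: the statement is the Claim_ definition above) =====
theorem to_txt_spec : Claim_equal_to_txt := by
  intro captions use_cleaned _ _
  unfold Spec_to_txt to_txt to_txt_alt
  apply String.toList_inj.mp
  rw [PySem.Str.toList_join, PySem.Str.toList_join]
  simp only [PySem.Chars.join]
  rw [show ("\n" : String).toList = ['\n'] from rfl, show ("" : String).toList = [] from rfl]
  rw [iflat]
  have hA := A_inv use_cleaned captions [] ""
  have hB := B_inv use_cleaned captions "" true
  simp only [inil, List.map_nil, List.nil_append, List.isEmpty_nil] at hA
  rw [hA, ← hB]
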